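-- pv_equiv track=rewrite | github.com/christinemanoukian/computation-and-modeling-homework | set 1/code.py | get_first_nth_terms_nonrecursive
-- ===== SOURCE A (Python) =====
-- def get_first_nth_terms_nonrecursive(n):
--   result = []
--   for num in range(1, n):
--     if num == 1:
--       first_term = 5
--       result.append(5)
--     result.append(3 * first_term - 4)
--     first_term = 3 * first_term - 4
--   return result
-- ===== SOURCE B (Python) =====
-- def get_first_nth_terms_nonrecursive(n):
--   # closed form: a_i = 3**(i+1) + 2 gives 5, 11, 29, 83, ...
--   return [3 ** (i + 1) + 2 for i in range(n)]
-- ===== Notes on version B (the rewrite author's own statement) =====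
-- stated objective: simpler
-- what changed: Replaces the running-recurrence loop (a -> 3*a - 4 with an appended first term) by a one-line closed-form comprehension [3**(i+1) + 2 for i in range(n)], with no stored state.
-- intended difference: For n = 1 A returns [] (its loop only starts emitting at num = 1 inside range(1, n), an off-by-one), while B returns [5], the intended first term of the sequence. — e.g. on get_first_nth_terms_nonrecursive(1): A returns [], B returns [5]
import Mathlib
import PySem

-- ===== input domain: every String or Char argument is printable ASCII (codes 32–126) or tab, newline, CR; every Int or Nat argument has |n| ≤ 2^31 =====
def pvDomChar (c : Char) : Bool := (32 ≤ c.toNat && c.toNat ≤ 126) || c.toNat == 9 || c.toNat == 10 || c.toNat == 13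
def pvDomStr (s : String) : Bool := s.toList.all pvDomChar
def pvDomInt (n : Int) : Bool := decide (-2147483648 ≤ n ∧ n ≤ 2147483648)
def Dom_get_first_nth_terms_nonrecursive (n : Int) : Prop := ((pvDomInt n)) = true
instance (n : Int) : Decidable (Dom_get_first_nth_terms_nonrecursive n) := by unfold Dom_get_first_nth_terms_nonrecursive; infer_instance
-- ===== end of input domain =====

-- B replaces A's running recurrence (first_term -> 3*first_term - 4) by the closed form
-- a_i = 3^(i+1) + 2, computed independently per index (objective: simpler).
-- A returns [] for n = 1; B returns [5] there (stated as the intended difference D_ below).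

-- ===== PORT A =====
-- loop body of A: state = (result, first_term); first_term's initial value is never read,
-- since range(1, n) starts at 1 and the num == 1 branch sets it first (dummy 0 stands in).
def pvBodyA (st : List Int × Int) (num : Int) : List Int × Int :=
  let st := if num == 1 then (st.1 ++ [5], 5) else st
  (st.1 ++ [3 * st.2 - 4], 3 * st.2 - 4)

def get_first_nth_terms_nonrecursive (n : Int) : List Int :=
  ((PySem.List.pyRange 1 n 1).foldl pvBodyA ([], 0)).1

-- ===== PORT B =====
def get_first_nth_terms_nonrecursive_alt (n : Int) : List Int :=
  (PySem.List.pyRange 0 n 1).map (fun i => 3 ^ (i + 1).toNat + 2)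

-- ===== PRECONDITION & SPEC =====
-- For n = 1 A returns [] (its loop only starts emitting at num = 1 inside range(1, n), an
-- off-by-one), while B returns [5], the intended first term of the sequence.
def D_get_first_nth_terms_nonrecursive (n : Int) : Prop := n = 1
instance (n : Int) : Decidable (D_get_first_nth_terms_nonrecursive n) := by unfold D_get_first_nth_terms_nonrecursive; infer_instance

def Spec_get_first_nth_terms_nonrecursive (n : Int) (out : List Int) : Prop :=
  ¬ D_get_first_nth_terms_nonrecursive n → out = get_first_nth_terms_nonrecursive_alt n
instance (n : Int) (out : List Int) : Decidable (Spec_get_first_nth_terms_nonrecursive n out) := by unfold Spec_get_first_nth_terms_nonrecursive; infer_instance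

def pvDiffWitness_get_first_nth_terms_nonrecursive : Int := 1
def pvDiffWitnessOut_get_first_nth_terms_nonrecursive : (List Int) × (List Int) := ([], [5])

-- ===== CLAIM (what is proved, stated in full; the proofs are below) =====
def Claim_unchanged_get_first_nth_terms_nonrecursive : Prop := ∀ (n : Int), Dom_get_first_nth_terms_nonrecursive n → Spec_get_first_nth_terms_nonrecursive n (get_first_nth_terms_nonrecursive n)
def Claim_changed_get_first_nth_terms_nonrecursive : Prop := Dom_get_first_nth_terms_nonrecursive (pvDiffWitness_get_first_nth_terms_nonrecursive) ∧ D_get_first_nth_terms_nonrecursive (pvDiffWitness_get_first_nth_terms_nonrecursive) ∧ get_first_nth_terms_nonrecursive (pvDiffWitness_get_first_nth_terms_nonrecursive) = pvDiffWitnessOut_get_first_nth_terms_nonrecursive.1 ∧ get_first_nth_terms_nonrecursive_alt (pvDiffWitness_get_first_nth_terms_nonrecursive) = pvDiffWitnessOut_get_first_nth_terms_nonrecursive.2 ∧ pvDiffWitnessOut_get_first_nth_terms_nonrecursive.1 ≠ pvDiffWitnessOut_get_first_nth_terms_nonrecursive.2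
def Claim_exact_get_first_nth_terms_nonrecursive : Prop := ∀ (n : Int), Dom_get_first_nth_terms_nonrecursive n → D_get_first_nth_terms_nonrecursive n → get_first_nth_terms_nonrecursive n ≠ get_first_nth_terms_nonrecursive_alt n

-- ===== LEMMAS AND PROOFS =====

-- A's loop invariant: after processing range(1, m+2) the result is the first m+2 closed-form
-- terms and first_term holds the last of them (3 ^ (m + 2) + 2).
lemma pvFoldA_inv (m : Nat) :
    (PySem.List.pyRange 1 ((m : Int) + 2) 1).foldl pvBodyA ([], 0)
      = ((List.range (m + 2)).map (fun k => (3 : Int) ^ (k + 1) + 2), 3 ^ (m + 2) + 2) := by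
  induction m with
  | zero => decide
  | succ m ih =>
      have h : (PySem.List.pyRange 1 (((m : Int) + 2) + 1) 1)
          = PySem.List.pyRange 1 ((m : Int) + 2) 1 ++ [(m : Int) + 2] :=
        PySem.List.pyRange_one_succ_right (by omega)
      have hcast : ((m + 1 : Nat) : Int) + 2 = ((m : Int) + 2) + 1 := by push_cast; ring
      rw [hcast, h, List.foldl_append, ih]
      unfold pvBodyA
      simp only [beq_iff_eq, List.foldl_cons, List.foldl_nil]
      rw [if_neg (show ¬((m : Int) + 2 = 1) by omega)]
      simp only [Prod.mk.injEq]
      constructor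
      · symm
        rw [show m + 1 + 2 = (m + 2) + 1 from by omega, List.range_succ, List.map_append]
        congr 1
        simp only [List.map_cons, List.map_nil]
        congr 1
        ring
      · ring

lemma pvAlt_eq (n : Int) (hn : 0 ≤ n) :
    get_first_nth_terms_nonrecursive_alt n
      = (List.range n.toNat).map (fun k => (3 : Int) ^ (k + 1) + 2) := by
  unfold get_first_nth_terms_nonrecursive_alt
  rw [PySem.List.pyRange_one, List.map_map]
  have h0 : (n - 0).toNat = n.toNat := by omega
  rw [h0]
  apply List.map_congr_left
  intro k _
  simp only [Function.comp]
  congr 2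
  omega

-- ===== VERDICT (by name: the statement is the Claim_ definition above) =====
theorem get_first_nth_terms_nonrecursive_spec : Claim_unchanged_get_first_nth_terms_nonrecursive := by
  intro n _ hD
  unfold D_get_first_nth_terms_nonrecursive at hD
  by_cases hle : n ≤ 1
  · -- n ≤ 0 here (n = 1 excluded): both loops/ranges are empty
    have hn0 : n ≤ 0 := by omega
    unfold get_first_nth_terms_nonrecursive get_first_nth_terms_nonrecursive_alt
    rw [PySem.List.pyRange_one_eq_nil (by omega), PySem.List.pyRange_one_eq_nil (by omega)]
    rfl
  · -- n ≥ 2: use the loop invariant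
    obtain ⟨m, hm⟩ : ∃ m : Nat, n = (m : Int) + 2 := ⟨(n - 2).toNat, by omega⟩
    subst hm
    unfold get_first_nth_terms_nonrecursive
    rw [pvFoldA_inv, pvAlt_eq _ (by omega)]
    congr 1

theorem get_first_nth_terms_nonrecursive_changed : Claim_changed_get_first_nth_terms_nonrecursive := by
  unfold Claim_changed_get_first_nth_terms_nonrecursive; decide

theorem get_first_nth_terms_nonrecursive_tight : Claim_exact_get_first_nth_terms_nonrecursive := by
  intro n _ hD
  unfold D_get_first_nth_terms_nonrecursive at hD
  subst hD
  decide
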